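-- pv_equiv track=rewrite | github.com/ywattenberg/MetaCoding | Rabbit.py | getMaxVisitableWebpages
-- ===== SOURCE A (Python) =====
-- from typing import List
--
-- def getMaxVisitableWebpages(N: int, L: List[int]) -> int:
--     # Write your code here
--     L = [l - 1 for l in L]
--     depth = [-1] * N
--     max_depth = -1
--     for i in range(N):
--         if depth[i] != -1:
--             continue
--         # Find cycle
--         seen = set()
--         order = []
--         j = i
--         while j not in seen and depth[j] == -1:
--             order.append(j)
--             seen.add(j)
--             j = L[j]
--         if depth[j] == -1:
--             # Find Cycle length
--             start, length, j = j, 1, L[j]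
--             while j != start:
--                 length += 1
--                 j = L[j]
--             # Set Cycle depths
--             depth[j] = length
--             j = L[j]
--             while j != start:
--                 depth[j] = length
--                 j = L[j]
--         # For all visited sites set depth
--         while len(order) > 0:
--             j = order.pop()
--             if depth[j] != -1:
--                 continue
--             else:
--                 depth[j] = depth[L[j]] + 1
--         max_depth = max(max_depth, depth[i])
--     return max_depth
-- ===== SOURCE B (Python) =====
-- from typing import List
--
-- def getMaxVisitableWebpages(N: int, L: List[int]) -> int:
--     best = -1
--     for i in range(N):
--         seen = set()
--         j = i
--         while j not in seen:
--             seen.add(j)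
--             j = L[j] - 1
--         best = max(best, len(seen))
--     return best
-- ===== Notes on version B (the rewrite author's own statement) =====
-- stated objective: simpler
-- what changed: Replaces A's memoized depth array with cycle detection, cycle-length measurement and an explicit back-tracking stack by an independent walk from each start node that collects the visited nodes in a set (the answer is the maximum set size); Pre_ excludes inputs where some of the first N links is outside 1..N or N exceeds len(L) -- there A either raises IndexError or returns a value produced by Python's accidental negative-index wraparound.
-- outside the precondition, e.g. on getMaxVisitableWebpages(2, [2, -1]): A returns 2, B returns 3
import Mathlib
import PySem

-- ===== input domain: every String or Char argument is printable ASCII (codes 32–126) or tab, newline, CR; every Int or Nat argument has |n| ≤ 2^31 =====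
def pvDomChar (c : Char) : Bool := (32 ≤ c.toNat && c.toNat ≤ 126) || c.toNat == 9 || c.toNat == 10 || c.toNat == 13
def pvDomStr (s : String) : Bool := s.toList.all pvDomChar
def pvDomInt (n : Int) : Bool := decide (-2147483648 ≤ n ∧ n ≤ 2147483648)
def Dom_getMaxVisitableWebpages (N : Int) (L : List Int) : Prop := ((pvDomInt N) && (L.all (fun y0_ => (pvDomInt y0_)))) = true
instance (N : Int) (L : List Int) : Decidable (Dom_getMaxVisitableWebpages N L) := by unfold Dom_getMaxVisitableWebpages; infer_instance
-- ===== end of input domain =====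

-- B replaces A's memoized depth/cycle bookkeeping by an independent visited-set walk from every
-- start node (simpler, not faster); equal on Pre_ (N ≤ len(L), first N links in 1..N).

-- ===== PORT A =====
-- depth[j] = v for an Int index; exact for 0 ≤ j < len(xs), the only indices reached inside Pre_
def pvSetAt (xs : List Int) (j : Int) (v : Int) : List Int := xs.set j.toNat v

-- 'while j not in seen and depth[j] == -1: order.append(j); seen.add(j); j = L[j]' (fueled; fuel
-- len(depth)+1 is enough inside Pre_, where each iteration adds a fresh node to seen)
def pvAWalk (L1 depth : List Int) : Nat → PySem.Set Int → List Int → Int → (List Int × Int)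
  | 0, _, order, j => (order, j)
  | fuel+1, seen, order, j =>
    if PySem.Set.contains seen j = false ∧ PySem.List.pyGetD depth j (-1) = -1 then
      pvAWalk L1 depth fuel (PySem.Set.add seen j) (order ++ [j]) (PySem.List.pyGetD L1 j 0)
    else (order, j)

-- 'while j != start: length += 1; j = L[j]' (fueled)
def pvACycLen (L1 : List Int) (start : Int) : Nat → Int → Int → (Int × Int)
  | 0, len, j => (len, j)
  | fuel+1, len, j =>
    if j ≠ start then pvACycLen L1 start fuel (len + 1) (PySem.List.pyGetD L1 j 0) else (len, j)

-- 'while j != start: depth[j] = length; j = L[j]' (fueled)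
def pvASetCyc (L1 : List Int) (start len : Int) : Nat → List Int → Int → List Int
  | 0, depth, _ => depth
  | fuel+1, depth, j =>
    if j ≠ start then pvASetCyc L1 start len fuel (pvSetAt depth j len) (PySem.List.pyGetD L1 j 0)
    else depth

-- 'while len(order) > 0: j = order.pop(); …' — popping from the end = walking order reversed
def pvAPop (L1 : List Int) : List Int → List Int → List Int
  | depth, [] => depth
  | depth, j :: rest =>
    if PySem.List.pyGetD depth j (-1) ≠ -1 then pvAPop L1 depth rest
    else pvAPop L1 (pvSetAt depth j (PySem.List.pyGetD depth (PySem.List.pyGetD L1 j 0) (-1) + 1)) rest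

-- one iteration of A's 'for i in range(N)' body, state = (depth, max_depth)
def pvAStep (L1 : List Int) (st : List Int × Int) (i : Int) : List Int × Int :=
  if PySem.List.pyGetD st.1 i (-1) ≠ -1 then st
  else
    let w := pvAWalk L1 st.1 (st.1.length + 1) PySem.Set.empty [] i
    let depth1 :=
      if PySem.List.pyGetD st.1 w.2 (-1) = -1 then
        let c := pvACycLen L1 w.2 (st.1.length + 1) 1 (PySem.List.pyGetD L1 w.2 0)
        pvASetCyc L1 w.2 c.1 (st.1.length + 1) (pvSetAt st.1 c.2 c.1) (PySem.List.pyGetD L1 c.2 0)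
      else st.1
    let depth2 := pvAPop L1 depth1 w.1.reverse
    (depth2, max st.2 (PySem.List.pyGetD depth2 i (-1)))

def getMaxVisitableWebpages (N : Int) (L : List Int) : Int :=
  let L1 := L.map (fun l => l - 1)
  ((PySem.List.pyRange 0 N 1).foldl (pvAStep L1) (List.replicate N.toNat (-1 : Int), -1)).2

-- ===== PORT B =====
-- 'while j not in seen: seen.add(j); j = L[j] - 1' then len(seen)  (fueled; len(L)+1 suffices inside Pre_)
def pvBCount (L : List Int) : Nat → PySem.Set Int → Int → Int
  | 0, seen, _ => PySem.List.len seen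
  | fuel+1, seen, j =>
    if PySem.Set.contains seen j then PySem.List.len seen
    else pvBCount L fuel (PySem.Set.add seen j) (PySem.List.pyGetD L j 0 - 1)

def getMaxVisitableWebpages_alt (N : Int) (L : List Int) : Int :=
  (PySem.List.pyRange 0 N 1).foldl
    (fun best i => max best (pvBCount L (L.length + 1) PySem.Set.empty i)) (-1)

-- ===== PRECONDITION & SPEC =====
-- Pre_ excludes inputs where N > len(L) or one of the first N links lies outside 1..N: on those A
-- either raises IndexError or returns a value of Python's accidental negative-index wraparound.
def Pre_getMaxVisitableWebpages (N : Int) (L : List Int) : Prop :=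
  N ≤ (L.length : Int) ∧ ∀ k : Nat, k < N.toNat → 1 ≤ L.getD k 0 ∧ L.getD k 0 ≤ N
instance (N : Int) (L : List Int) : Decidable (Pre_getMaxVisitableWebpages N L) := by
  unfold Pre_getMaxVisitableWebpages; infer_instance
def pvWitness_getMaxVisitableWebpages : Int × List Int := (4, [4, 1, 2, 1])

def Spec_getMaxVisitableWebpages (N : Int) (L : List Int) (out : Int) : Prop := out = getMaxVisitableWebpages_alt N L
instance (N : Int) (L : List Int) (out : Int) : Decidable (Spec_getMaxVisitableWebpages N L out) := by unfold Spec_getMaxVisitableWebpages; infer_instance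

-- ===== CLAIM (what is proved, stated in full; the proofs are below) =====
def Claim_equal_getMaxVisitableWebpages : Prop := ∀ (N : Int) (L : List Int), Dom_getMaxVisitableWebpages N L → Pre_getMaxVisitableWebpages N L → Spec_getMaxVisitableWebpages N L (getMaxVisitableWebpages N L)

-- ===== LEMMAS AND PROOFS =====

-- t is a repeat time of the walk of f from i
abbrev pvRep (f : Nat → Nat) (i t : Nat) : Prop :=
  ((List.range t).any (fun k => f^[t] i == f^[k] i)) = true

theorem pvRep_iff (f : Nat → Nat) (i t : Nat) :
    pvRep f i t ↔ ∃ k < t, f^[t] i = f^[k] i := by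
  simp [pvRep, List.any_eq_true, List.mem_range]

-- first repeat time of the walk from i = number of distinct nodes visited from i
-- (n+1 is an escape value never reached when f maps [0,n) into itself and i < n)
def pvT (f : Nat → Nat) (n i : Nat) : Nat :=
  Nat.find (p := fun t => pvRep f i t ∨ t = n + 1) ⟨n + 1, Or.inr rfl⟩

-- value of the depth array at a Nat index
def pvDv (d : List Int) (j : Nat) : Int := d.getD j (-1)

-- exit time of A's first while loop started at m
def pvRex (f : Nat → Nat) (n : Nat) (d : List Int) (m : Nat) : Nat :=
  Nat.find (p := fun t => (pvRep f m t ∨ pvDv d (f^[t] m) ≠ -1) ∨ t = n + 1) ⟨n + 1, Or.inr rfl⟩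

-- seen/order after t iterations of the walk from m
def pvSeen (f : Nat → Nat) (m t : Nat) : List Int := (List.range t).map (fun k => ((f^[k] m : Nat) : Int))

-- invariant of A's depth array and running maximum
def pvGood (f : Nat → Nat) (n : Nat) (d : List Int) (md : Int) : Prop :=
  d.length = n ∧
  (∀ j < n, pvDv d j = -1 ∨ pvDv d j = (pvT f n j : Int)) ∧
  (∀ j < n, pvDv d j ≠ -1 → pvDv d (f j) ≠ -1) ∧
  (∀ j < n, pvDv d j ≠ -1 → (pvT f n j : Int) ≤ md)

-- running maximum of pvT over the first m starts
def pvB (f : Nat → Nat) (n m : Nat) : Int :=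
  (List.range m).foldl (fun b k => max b ((pvT f n k : Nat) : Int)) (-1)

theorem pv_orbit (f : Nat → Nat) (n : Nat) (hfn : ∀ k, k < n → f k < n) (i : Nat) (hi : i < n) :
    ∀ t, f^[t] i < n := by
  intro t; induction t with
  | zero => simpa using hi
  | succ t ih => rw [Function.iterate_succ_apply']; exact hfn _ ih

theorem pvRep_exists (f : Nat → Nat) (n : Nat) (hfn : ∀ k, k < n → f k < n) (i : Nat) (hi : i < n) :
    ∃ t, t ≤ n ∧ pvRep f i t := by
  have hmaps : Set.MapsTo (fun k => f^[k] i) (↑(Finset.range (n + 1))) (↑(Finset.range n)) := by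
    intro a _
    simpa using pv_orbit f n hfn i hi a
  have hcard : (Finset.range n).card < (Finset.range (n + 1)).card := by simp
  rcases Finset.exists_ne_map_eq_of_card_lt_of_maps_to hcard hmaps with ⟨a, ha, b, hb, hab, he⟩
  rcases Nat.lt_or_ge a b with h | h
  · exact ⟨b, by simpa using Nat.lt_succ_iff.mp (Finset.mem_range.mp hb),
      (pvRep_iff f i b).mpr ⟨a, h, he.symm⟩⟩
  · have h' : b < a := lt_of_le_of_ne h (fun e => hab e.symm)
    exact ⟨a, by simpa using Nat.lt_succ_iff.mp (Finset.mem_range.mp ha),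
      (pvRep_iff f i a).mpr ⟨b, h', he⟩⟩

theorem pvT_le_of_rep (f : Nat → Nat) (n i t : Nat) (h : pvRep f i t) : pvT f n i ≤ t := by
  unfold pvT; exact Nat.find_min' _ (Or.inl h)

theorem pvT_le_n (f : Nat → Nat) (n : Nat) (hfn : ∀ k, k < n → f k < n) (i : Nat) (hi : i < n) :
    pvT f n i ≤ n := by
  rcases pvRep_exists f n hfn i hi with ⟨t, ht, hr⟩
  exact le_trans (pvT_le_of_rep f n i t hr) ht

theorem pvT_rep (f : Nat → Nat) (n : Nat) (hfn : ∀ k, k < n → f k < n) (i : Nat) (hi : i < n) :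
    pvRep f i (pvT f n i) := by
  have hle := pvT_le_n f n hfn i hi
  unfold pvT at hle ⊢
  rcases Nat.find_spec (p := fun t => pvRep f i t ∨ t = n + 1) ⟨n + 1, Or.inr rfl⟩ with h | h
  · exact h
  · omega

theorem pv_not_rep_lt (f : Nat → Nat) (n i t : Nat) (h : t < pvT f n i) : ¬ pvRep f i t := by
  intro hr
  exact absurd (pvT_le_of_rep f n i t hr) (by omega)

theorem pvT_inj (f : Nat → Nat) (n i a b : Nat) (hab : a < b) (hb : b < pvT f n i) :
    f^[a] i ≠ f^[b] i := by
  intro h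
  exact pv_not_rep_lt f n i b hb ((pvRep_iff f i b).mpr ⟨a, hab, h.symm⟩)

theorem pvT_pos (f : Nat → Nat) (n : Nat) (hfn : ∀ k, k < n → f k < n) (i : Nat) (hi : i < n) :
    0 < pvT f n i := by
  rcases Nat.eq_zero_or_pos (pvT f n i) with h | h
  · exfalso
    have := pvT_rep f n hfn i hi
    rw [h, pvRep_iff] at this
    rcases this with ⟨k, hk, _⟩; omega
  · exact h

theorem pvT_succ_of_not_per (f : Nat → Nat) (n : Nat) (hfn : ∀ k, k < n → f k < n)
    (i : Nat) (hi : i < n) (hnp : i ∉ Function.periodicPts f) :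
    pvT f n i = pvT f n (f i) + 1 := by
  have key : ∀ t, pvRep f (f i) t ↔ pvRep f i (t + 1) := by
    intro t
    rw [pvRep_iff, pvRep_iff]
    constructor
    · rintro ⟨k, hk, he⟩
      exact ⟨k + 1, by omega, by
        rw [Function.iterate_succ_apply, Function.iterate_succ_apply]; exact he⟩
    · rintro ⟨k, hk, he⟩
      match k with
      | 0 =>
        exfalso
        exact hnp ⟨t + 1, by omega, he⟩
      | k + 1 =>
        exact ⟨k, by omega, by
          rw [Function.iterate_succ_apply, Function.iterate_succ_apply] at he; exact he⟩
  have h1 : pvT f n i ≤ pvT f n (f i) + 1 := by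
    apply pvT_le_of_rep
    rw [← key]
    exact pvT_rep f n hfn (f i) (hfn i hi)
  have h2 : pvT f n (f i) + 1 ≤ pvT f n i := by
    have hp := pvT_rep f n hfn i hi
    have hpos := pvT_pos f n hfn i hi
    obtain ⟨u, hu⟩ : ∃ u, pvT f n i = u + 1 := ⟨pvT f n i - 1, by omega⟩
    rw [hu] at hp
    have : pvRep f (f i) u := (key u).mpr hp
    have := pvT_le_of_rep f n (f i) u this
    omega
  omega

theorem pv_per_iterate (f : Nat → Nat) (x : Nat) (hx : x ∈ Function.periodicPts f) (u : Nat) :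
    f^[u] x ∈ Function.periodicPts f ∧
      Function.minimalPeriod f (f^[u] x) = Function.minimalPeriod f x := by
  induction u with
  | zero => exact ⟨hx, rfl⟩
  | succ u ih =>
    rw [Function.iterate_succ_apply']
    rcases ih with ⟨h1, h2⟩
    rcases h1 with ⟨q, hq, hp⟩
    refine ⟨⟨q, hq, hp.apply⟩, ?_⟩
    rw [Function.minimalPeriod_apply ⟨q, hq, hp⟩, h2]

theorem pvT_eq_minimalPeriod (f : Nat → Nat) (n : Nat) (hfn : ∀ k, k < n → f k < n)
    (i : Nat) (hi : i < n) (hp : i ∈ Function.periodicPts f) :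
    pvT f n i = Function.minimalPeriod f i := by
  have hpos := Function.minimalPeriod_pos_of_mem_periodicPts hp
  have h1 : pvT f n i ≤ Function.minimalPeriod f i := by
    apply pvT_le_of_rep
    rw [pvRep_iff]
    exact ⟨0, hpos, by simp⟩
  have h2 : Function.minimalPeriod f i ≤ pvT f n i := by
    by_contra hlt
    push Not at hlt
    -- pvT f n i < minimalPeriod; but pvRep (pvT) gives a collision below the minimal period
    have hrep := pvT_rep f n hfn i hi
    rw [pvRep_iff] at hrep
    rcases hrep with ⟨k, hk, he⟩
    have := Function.iterate_injOn_Iio_minimalPeriod (f := f) (x := i)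
      (Set.mem_Iio.mpr hlt) (Set.mem_Iio.mpr (lt_trans hk hlt)) he
    omega
  omega

theorem pvT_apply_le (f : Nat → Nat) (n : Nat) (hfn : ∀ k, k < n → f k < n)
    (i : Nat) (hi : i < n) : pvT f n (f i) ≤ pvT f n i := by
  by_cases hp : i ∈ Function.periodicPts f
  · have h1 := pvT_eq_minimalPeriod f n hfn i hi hp
    have hfi := pv_per_iterate f i hp 1
    rw [Function.iterate_one] at hfi
    have h2 := pvT_eq_minimalPeriod f n hfn (f i) (hfn i hi) hfi.1
    omega
  · rw [pvT_succ_of_not_per f n hfn i hi hp]; omega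

theorem pvT_iterate_le (f : Nat → Nat) (n : Nat) (hfn : ∀ k, k < n → f k < n)
    (i : Nat) (hi : i < n) (k : Nat) : pvT f n (f^[k] i) ≤ pvT f n i := by
  induction k with
  | zero => simp
  | succ k ih =>
    rw [Function.iterate_succ_apply']
    exact le_trans (pvT_apply_le f n hfn _ (pv_orbit f n hfn i hi k)) ih


-- ---- bridging utilities ----

theorem pvDv_pyGetD (d : List Int) (j : Nat) : PySem.List.pyGetD d (j : Int) (-1) = pvDv d j := by
  simp [pvDv, PySem.List.pyGetD_natCast]

theorem pvSetAt_length (d : List Int) (j v : Int) : (pvSetAt d j v).length = d.length := by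
  simp [pvSetAt]

theorem pvDv_setAt (d : List Int) (j : Nat) (hj : j < d.length) (v : Int) (x : Nat) :
    pvDv (pvSetAt d (j : Int) v) x = if x = j then v else pvDv d x := by
  simp only [pvSetAt, pvDv, Int.toNat_natCast, List.getD_eq_getElem?_getD, List.getElem?_set]
  by_cases h : x = j
  · simp [h, hj]
  · rw [if_neg h, if_neg (fun e => h e.symm)]

theorem pvSeen_succ (f : Nat → Nat) (m t : Nat) :
    pvSeen f m (t + 1) = pvSeen f m t ++ [((f^[t] m : Nat) : Int)] := by
  simp [pvSeen, List.range_succ]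

theorem pvSeen_length (f : Nat → Nat) (m t : Nat) : (pvSeen f m t).length = t := by
  simp [pvSeen]

theorem pv_contains_seen (f : Nat → Nat) (m t j : Nat) :
    PySem.Set.contains (pvSeen f m t) ((j : Nat) : Int) = true ↔ ∃ k < t, f^[k] m = j := by
  constructor
  · intro h
    have hmem := List.mem_of_elem_eq_true h
    simp only [pvSeen, List.mem_map, List.mem_range] at hmem
    rcases hmem with ⟨k, hk, he⟩
    exact ⟨k, hk, by exact_mod_cast he⟩
  · rintro ⟨k, hk, he⟩
    apply List.elem_eq_true_of_mem
    simp only [pvSeen, List.mem_map, List.mem_range]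
    exact ⟨k, hk, by exact_mod_cast he⟩

theorem pv_add_seen (f : Nat → Nat) (m t : Nat) (h : ¬ ∃ k < t, f^[k] m = f^[t] m) :
    PySem.Set.add (pvSeen f m t) ((f^[t] m : Nat) : Int) = pvSeen f m (t + 1) := by
  have hc : PySem.Set.contains (pvSeen f m t) ((f^[t] m : Nat) : Int) = false := by
    rw [Bool.eq_false_iff]
    intro hcon
    exact h ((pv_contains_seen f m t (f^[t] m)).mp hcon)
  rw [pvSeen_succ]
  simp only [PySem.Set.add, hc, Bool.false_eq_true, if_false]

theorem pv_closure_iterate (f : Nat → Nat) (n : Nat) (hfn : ∀ k, k < n → f k < n) (d : List Int)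
    (hcl : ∀ j < n, pvDv d j ≠ -1 → pvDv d (f j) ≠ -1) (z : Nat) (hz : z < n)
    (hdz : pvDv d z ≠ -1) : ∀ r, pvDv d (f^[r] z) ≠ -1 := by
  intro r; induction r with
  | zero => simpa using hdz
  | succ r ih =>
    rw [Function.iterate_succ_apply']
    exact hcl _ (pv_orbit f n hfn z hz r) ih

-- ---- exit time of the walk ----

theorem pvRex_le_T (f : Nat → Nat) (n : Nat) (hfn : ∀ k, k < n → f k < n) (d : List Int)
    (m : Nat) (hm : m < n) : pvRex f n d m ≤ pvT f n m := by
  unfold pvRex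
  exact Nat.find_min' _ (Or.inl (Or.inl (pvT_rep f n hfn m hm)))

theorem pvRex_spec (f : Nat → Nat) (n : Nat) (hfn : ∀ k, k < n → f k < n) (d : List Int)
    (m : Nat) (hm : m < n) :
    pvRep f m (pvRex f n d m) ∨ pvDv d (f^[pvRex f n d m] m) ≠ -1 := by
  have hle := le_trans (pvRex_le_T f n hfn d m hm) (pvT_le_n f n hfn m hm)
  unfold pvRex at hle ⊢
  rcases Nat.find_spec (p := fun t => (pvRep f m t ∨ pvDv d (f^[t] m) ≠ -1) ∨ t = n + 1)
    ⟨n + 1, Or.inr rfl⟩ with h | h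
  · exact h
  · omega

theorem pvRex_min (f : Nat → Nat) (n : Nat) (d : List Int) (m t : Nat)
    (h : t < pvRex f n d m) : ¬ pvRep f m t ∧ pvDv d (f^[t] m) = -1 := by
  unfold pvRex at h
  have := Nat.find_min (p := fun t => (pvRep f m t ∨ pvDv d (f^[t] m) ≠ -1) ∨ t = n + 1)
    ⟨n + 1, Or.inr rfl⟩ h
  push Not at this
  exact ⟨this.1.1, this.1.2⟩

theorem pvRex_pos (f : Nat → Nat) (n : Nat) (hfn : ∀ k, k < n → f k < n) (d : List Int)
    (m : Nat) (hm : m < n) (hdm : pvDv d m = -1) : 0 < pvRex f n d m := by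
  rcases Nat.eq_zero_or_pos (pvRex f n d m) with h | h
  · exfalso
    rcases pvRex_spec f n hfn d m hm with hr | hr <;> rw [h] at hr
    · rw [pvRep_iff] at hr; rcases hr with ⟨k, hk, _⟩; omega
    · simp at hr; exact hr hdm
  · exact h

-- ---- A's loops ----

theorem pvWalk_run (L1 d : List Int) (f : Nat → Nat) (n : Nat)
    (hfn : ∀ k, k < n → f k < n)
    (hb : ∀ k, k < n → PySem.List.pyGetD L1 (k : Int) 0 = ((f k : Nat) : Int))
    (m : Nat) (hm : m < n) :
    ∀ fuel t, t ≤ pvRex f n d m → pvRex f n d m - t < fuel →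
      pvAWalk L1 d fuel (pvSeen f m t) (pvSeen f m t) ((f^[t] m : Nat) : Int)
        = (pvSeen f m (pvRex f n d m), ((f^[pvRex f n d m] m : Nat) : Int)) := by
  intro fuel
  induction fuel with
  | zero => intro t ht hf; omega
  | succ fuel ih =>
    intro t ht hf
    rcases eq_or_lt_of_le ht with he | hlt
    · subst he
      rw [pvAWalk, if_neg]
      rintro ⟨h1, h2⟩
      rcases pvRex_spec f n hfn d m hm with hr | hr
      · rw [pvRep_iff] at hr
        rcases hr with ⟨k, hk, hkE⟩
        have : PySem.Set.contains (pvSeen f m (pvRex f n d m)) ((f^[pvRex f n d m] m : Nat) : Int) = true :=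
          (pv_contains_seen f m _ _).mpr ⟨k, hk, hkE.symm⟩
        rw [h1] at this; exact Bool.false_ne_true this
      · rw [pvDv_pyGetD] at h2; exact hr h2
    · have hmin := pvRex_min f n d m t hlt
      have hnotrep : ¬ ∃ k < t, f^[k] m = f^[t] m := by
        intro ⟨k, hk, hkE⟩
        exact hmin.1 ((pvRep_iff f m t).mpr ⟨k, hk, hkE.symm⟩)
      rw [pvAWalk, if_pos]
      · rw [pv_add_seen f m t hnotrep, ← pvSeen_succ f m t]
        have hstep : PySem.List.pyGetD L1 ((f^[t] m : Nat) : Int) 0 = ((f^[t+1] m : Nat) : Int) := by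
          rw [hb _ (pv_orbit f n hfn m hm t)]
          norm_cast
          rw [← Function.iterate_succ_apply' f t m]
        rw [hstep]
        exact ih (t + 1) hlt (by omega)
      · constructor
        · rw [Bool.eq_false_iff]
          intro hcon
          exact hnotrep ((pv_contains_seen f m t _).mp hcon)
        · rw [pvDv_pyGetD]; exact hmin.2

theorem pvCycLen_run (L1 : List Int) (f : Nat → Nat) (n : Nat)
    (hfn : ∀ k, k < n → f k < n)
    (hb : ∀ k, k < n → PySem.List.pyGetD L1 (k : Int) 0 = ((f k : Nat) : Int))
    (x : Nat) (hx : x < n) (hxper : x ∈ Function.periodicPts f) :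
    ∀ fuel u, 1 ≤ u → u ≤ Function.minimalPeriod f x → Function.minimalPeriod f x - u < fuel →
      pvACycLen L1 (x : Int) fuel (u : Int) ((f^[u] x : Nat) : Int)
        = (((Function.minimalPeriod f x : Nat) : Int), (x : Int)) := by
  intro fuel
  induction fuel with
  | zero => intro u _ hu2 hf; omega
  | succ fuel ih =>
    intro u hu1 hu2 hf
    rcases eq_or_lt_of_le hu2 with he | hlt
    · have hx0 : f^[Function.minimalPeriod f x] x = x := Function.isPeriodicPt_minimalPeriod f x
      rw [he, pvACycLen, hx0, if_neg (by simp)]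
    · have hne : f^[u] x ≠ x := by
        intro he
        have := Function.iterate_injOn_Iio_minimalPeriod (f := f) (x := x)
          (Set.mem_Iio.mpr hlt) (Set.mem_Iio.mpr (lt_of_le_of_lt (Nat.zero_le u) hlt))
          (by simpa using he)
        omega
      rw [pvACycLen, if_pos (by exact_mod_cast hne)]
      have hstep : PySem.List.pyGetD L1 ((f^[u] x : Nat) : Int) 0 = ((f^[u+1] x : Nat) : Int) := by
        rw [hb _ (pv_orbit f n hfn x hx u)]
        norm_cast
        rw [← Function.iterate_succ_apply' f u x]
      rw [hstep]
      have : ((u : Int) + 1) = (((u + 1 : Nat) : Nat) : Int) := by push_cast; ring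
      rw [this]
      exact ih (u + 1) (by omega) hlt (by omega)

theorem pvSetCyc_run (L1 : List Int) (f : Nat → Nat) (n : Nat)
    (hfn : ∀ k, k < n → f k < n)
    (hb : ∀ k, k < n → PySem.List.pyGetD L1 (k : Int) 0 = ((f k : Nat) : Int))
    (x : Nat) (hx : x < n) (hper : x ∈ Function.periodicPts f) (v : Int) :
    ∀ fuel u (dc : List Int), dc.length = n → 1 ≤ u → u ≤ Function.minimalPeriod f x →
      Function.minimalPeriod f x - u < fuel →
      (pvASetCyc L1 (x : Int) v fuel dc ((f^[u] x : Nat) : Int)).length = n ∧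
      ∀ jj, pvDv (pvASetCyc L1 (x : Int) v fuel dc ((f^[u] x : Nat) : Int)) jj =
        if ∃ w < Function.minimalPeriod f x, u ≤ w ∧ jj = f^[w] x then v else pvDv dc jj := by
  intro fuel
  induction fuel with
  | zero => intro u dc _ _ hu2 hf; omega
  | succ fuel ih =>
    intro u dc hlen hu1 hu2 hf
    rcases eq_or_lt_of_le hu2 with he | hlt
    · have hx0 : f^[Function.minimalPeriod f x] x = x := Function.isPeriodicPt_minimalPeriod f x
      rw [he, pvASetCyc, hx0, if_neg (by simp)]
      refine ⟨hlen, fun jj => ?_⟩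
      rw [if_neg]
      rintro ⟨w, hw, hle, _⟩
      omega
    · have hne : f^[u] x ≠ x := by
        intro he
        have := Function.iterate_injOn_Iio_minimalPeriod (f := f) (x := x)
          (Set.mem_Iio.mpr hlt) (Set.mem_Iio.mpr (lt_of_le_of_lt (Nat.zero_le u) hlt))
          (by simpa using he)
        omega
      rw [pvASetCyc, if_pos (by exact_mod_cast hne)]
      have hstep : PySem.List.pyGetD L1 ((f^[u] x : Nat) : Int) 0 = ((f^[u+1] x : Nat) : Int) := by
        rw [hb _ (pv_orbit f n hfn x hx u)]
        norm_cast
        rw [← Function.iterate_succ_apply' f u x]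
      rw [hstep]
      have hlen' : (pvSetAt dc ((f^[u] x : Nat) : Int) v).length = n := by
        rw [pvSetAt_length]; exact hlen
      obtain ⟨hL, hC⟩ := ih (u + 1) (pvSetAt dc ((f^[u] x : Nat) : Int) v) hlen' (by omega) hlt (by omega)
      refine ⟨hL, fun jj => ?_⟩
      rw [hC jj, pvDv_setAt dc (f^[u] x) (by rw [hlen]; exact pv_orbit f n hfn x hx u) v jj]
      by_cases hg : ∃ w < Function.minimalPeriod f x, u ≤ w ∧ jj = f^[w] x
      · rw [if_pos hg]
        rcases hg with ⟨w, hw, hwu, hje⟩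
        by_cases hg' : ∃ w < Function.minimalPeriod f x, u + 1 ≤ w ∧ jj = f^[w] x
        · rw [if_pos hg']
        · rw [if_neg hg', if_pos]
          have hwu' : w = u := by
            by_contra hne'
            exact hg' ⟨w, hw, by omega, hje⟩
          rw [hje, hwu']
      · rw [if_neg hg, if_neg, if_neg]
        · intro hje
          exact hg ⟨u, hlt, le_refl u, hje⟩
        · rintro ⟨w, hw, hwu, hje⟩
          exact hg ⟨w, hw, by omega, hje⟩

theorem pvPop_run (L1 : List Int) (f : Nat → Nat) (n : Nat)
    (hfn : ∀ k, k < n → f k < n)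
    (hb : ∀ k, k < n → PySem.List.pyGetD L1 (k : Int) 0 = ((f k : Nat) : Int))
    (m : Nat) (hm : m < n) :
    ∀ t (dc : List Int), dc.length = n →
      (∀ j < n, pvDv dc j = -1 ∨ pvDv dc j = (pvT f n j : Int)) →
      pvDv dc (f^[t] m) ≠ -1 →
      (∀ k < t, pvDv dc (f^[k] m) = -1 → f^[k] m ∉ Function.periodicPts f) →
      (pvAPop L1 dc (pvSeen f m t).reverse).length = n ∧
      ∀ jj, pvDv (pvAPop L1 dc (pvSeen f m t).reverse) jj =
        if ∃ k < t, jj = f^[k] m then (pvT f n jj : Int) else pvDv dc jj := by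
  intro t
  induction t with
  | zero =>
    intro dc hlen _ _ _
    simp only [pvSeen, List.range_zero, List.map_nil, List.reverse_nil, pvAPop]
    exact ⟨hlen, fun jj => by rw [if_neg (by rintro ⟨k, hk, _⟩; omega)]⟩
  | succ t ih =>
    intro dc hlen h1 h2 h3
    have horb : f^[t] m < n := pv_orbit f n hfn m hm t
    have hrev : (pvSeen f m (t + 1)).reverse
        = ((f^[t] m : Nat) : Int) :: (pvSeen f m t).reverse := by
      rw [pvSeen_succ]; simp
    rw [hrev, pvAPop]
    by_cases hset : pvDv dc (f^[t] m) = -1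
    · -- node still unset: depth[j] = depth[L[j]] + 1
      rw [if_neg (by rw [pvDv_pyGetD]; simp [hset])]
      have hsucc : PySem.List.pyGetD L1 ((f^[t] m : Nat) : Int) 0 = ((f^[t+1] m : Nat) : Int) := by
        rw [hb _ horb]
        norm_cast
        rw [← Function.iterate_succ_apply' f t m]
      have hnp : f^[t] m ∉ Function.periodicPts f := h3 t (Nat.lt_succ_self t) hset
      have hTt : pvT f n (f^[t] m) = pvT f n (f^[t+1] m) + 1 := by
        rw [pvT_succ_of_not_per f n hfn (f^[t] m) horb hnp, Function.iterate_succ_apply']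
      have hval : PySem.List.pyGetD dc (PySem.List.pyGetD L1 ((f^[t] m : Nat) : Int) 0) (-1) + 1
          = ((pvT f n (f^[t] m) : Nat) : Int) := by
        rw [hsucc, pvDv_pyGetD]
        rcases h1 (f^[t+1] m) (pv_orbit f n hfn m hm (t+1)) with hc | hc
        · exact absurd hc h2
        · rw [hc, hTt]; push_cast; ring
      rw [hval]
      set dc' := pvSetAt dc ((f^[t] m : Nat) : Int) ((pvT f n (f^[t] m) : Nat) : Int) with hdc'
      have hlen' : dc'.length = n := by rw [hdc', pvSetAt_length]; exact hlen
      have hchar : ∀ jj, pvDv dc' jj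
          = if jj = f^[t] m then ((pvT f n (f^[t] m) : Nat) : Int) else pvDv dc jj := by
        intro jj
        rw [hdc', pvDv_setAt dc (f^[t] m) (by rw [hlen]; exact horb)]
      have hne1 : ((pvT f n (f^[t] m) : Nat) : Int) ≠ -1 := by omega
      have hH1 : ∀ j < n, pvDv dc' j = -1 ∨ pvDv dc' j = (pvT f n j : Int) := by
        intro j hj
        rw [hchar j]
        by_cases hje : j = f^[t] m
        · rw [if_pos hje]; right; rw [hje]
        · rw [if_neg hje]; exact h1 j hj
      have hH2 : pvDv dc' (f^[t] m) ≠ -1 := by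
        rw [hchar]; simp [hne1]
      have hH3 : ∀ k < t, pvDv dc' (f^[k] m) = -1 → f^[k] m ∉ Function.periodicPts f := by
        intro k hk hdk
        rw [hchar] at hdk
        by_cases hje : f^[k] m = f^[t] m
        · rw [if_pos hje] at hdk; exact absurd hdk hne1
        · rw [if_neg hje] at hdk; exact h3 k (by omega) hdk
      obtain ⟨hL, hC⟩ := ih dc' hlen' hH1 hH2 hH3
      refine ⟨hL, fun jj => ?_⟩
      rw [hC jj]
      by_cases hg : ∃ k < t, jj = f^[k] m
      · rcases hg with ⟨k, hk, hje⟩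
        rw [if_pos ⟨k, hk, hje⟩, if_pos ⟨k, by omega, hje⟩]
      · rw [if_neg hg, hchar jj]
        by_cases hje : jj = f^[t] m
        · rw [if_pos hje, if_pos ⟨t, by omega, hje⟩, hje]
        · rw [if_neg hje, if_neg]
          rintro ⟨k, hk, hke⟩
          rcases Nat.lt_or_ge k t with h | h
          · exact hg ⟨k, h, hke⟩
          · exact hje (by rw [hke]; congr 1; omega)
    · -- already set: skip
      rw [if_pos (by rw [pvDv_pyGetD]; simp [hset])]
      obtain ⟨hL, hC⟩ := ih dc hlen h1 hset (fun k hk hdk => h3 k (by omega) hdk)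
      refine ⟨hL, fun jj => ?_⟩
      rw [hC jj]
      by_cases hg : ∃ k < t, jj = f^[k] m
      · rcases hg with ⟨k, hk, hje⟩
        rw [if_pos ⟨k, hk, hje⟩, if_pos ⟨k, by omega, hje⟩]
      · rw [if_neg hg]
        by_cases hje : jj = f^[t] m
        · rw [if_pos ⟨t, by omega, hje⟩, hje]
          rcases h1 (f^[t] m) horb with hc | hc
          · exact absurd hc hset
          · exact hc
        · rw [if_neg]
          rintro ⟨k, hk, hke⟩
          rcases Nat.lt_or_ge k t with h | h
          · exact hg ⟨k, h, hke⟩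
          · exact hje (by rw [hke]; congr 1; omega)

theorem pv_iterate_back (f : Nat → Nat) (y : Nat) (hy : y ∈ Function.periodicPts f) (a : Nat) :
    ∃ r, f^[r] (f^[a] y) = y := by
  obtain ⟨q, hq, hper⟩ := hy
  refine ⟨q * a - a, ?_⟩
  rw [← Function.iterate_add_apply]
  have hqa : a ≤ q * a := Nat.le_mul_of_pos_left a hq
  have : q * a - a + a = q * a := by omega
  rw [this]
  exact hper.mul_const a

theorem pvStep_run (L1 : List Int) (f : Nat → Nat) (n : Nat)
    (hfn : ∀ k, k < n → f k < n)
    (hb : ∀ k, k < n → PySem.List.pyGetD L1 (k : Int) 0 = ((f k : Nat) : Int))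
    (d : List Int) (md : Int) (hg : pvGood f n d md) (m : Nat) (hm : m < n)
    (hdm : pvDv d m = -1) :
    ∃ d', pvAStep L1 (d, md) (m : Int) = (d', max md ((pvT f n m : Nat) : Int)) ∧
      pvGood f n d' (max md ((pvT f n m : Nat) : Int)) ∧
      (∀ j, pvDv d j ≠ -1 → pvDv d' j ≠ -1) ∧ pvDv d' m ≠ -1 := by
  obtain ⟨hlen, hC1, hC2, hC3⟩ := hg
  have hRT : pvRex f n d m ≤ pvT f n m := pvRex_le_T f n hfn d m hm
  have hTn : pvT f n m ≤ n := pvT_le_n f n hfn m hm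
  have hRpos : 0 < pvRex f n d m := pvRex_pos f n hfn d m hm hdm
  set R := pvRex f n d m with hRdef
  -- run the walk
  have hwalk : pvAWalk L1 d (d.length + 1) PySem.Set.empty [] ((m : Nat) : Int)
      = (pvSeen f m R, ((f^[R] m : Nat) : Int)) := by
    have h0 := pvWalk_run L1 d f n hfn hb m hm (d.length + 1) 0 (by omega) (by omega)
    simpa [pvSeen] using h0
  -- the walked nodes are unset in d
  have hUnset : ∀ k, k < R → pvDv d (f^[k] m) = -1 := fun k hk => (pvRex_min f n d m k hk).2
  -- the common core: depth1 satisfies the pop preconditions and a characterisation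
  -- (established separately in the cycle and no-cycle branches below)
  have main : ∀ dC : List Int, dC.length = n →
      (∀ j < n, pvDv dC j = -1 ∨ pvDv dC j = (pvT f n j : Int)) →
      pvDv dC (f^[R] m) ≠ -1 →
      (∀ k < R, pvDv dC (f^[k] m) = -1 → f^[k] m ∉ Function.periodicPts f) →
      (∀ jj, (¬ ∃ k < R, jj = f^[k] m) → pvDv dC jj = pvDv d jj) →
      (pvAPop L1 dC (pvSeen f m R).reverse).length = n ∧
      ∀ jj, pvDv (pvAPop L1 dC (pvSeen f m R).reverse) jj
        = if ∃ k < R, jj = f^[k] m then (pvT f n jj : Int) else pvDv d jj := by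
    intro dC hCL h1 h2 h3 hkeep
    obtain ⟨hPL, hPC⟩ := pvPop_run L1 f n hfn hb m hm R dC hCL h1 h2 h3
    refine ⟨hPL, fun jj => ?_⟩
    rw [hPC jj]
    by_cases hg : ∃ k < R, jj = f^[k] m
    · rw [if_pos hg, if_pos hg]
    · rw [if_neg hg, if_neg hg]
      exact hkeep jj hg
  -- the final packaging, given the pop result
  have finish : ∀ dP : List Int, dP.length = n →
      (∀ jj, pvDv dP jj = if ∃ k < R, jj = f^[k] m then (pvT f n jj : Int) else pvDv d jj) →
      pvGood f n dP (max md ((pvT f n m : Nat) : Int)) ∧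
      (∀ j, pvDv d j ≠ -1 → pvDv dP j ≠ -1) ∧ pvDv dP m ≠ -1 := by
    intro dP hPL hchar
    have hkeep : ∀ j, pvDv d j ≠ -1 → pvDv dP j ≠ -1 := by
      intro j hj
      rw [hchar j]
      by_cases hg : ∃ k < R, j = f^[k] m
      · rw [if_pos hg]; omega
      · rw [if_neg hg]; exact hj
    have hm0 : pvDv dP m ≠ -1 := by
      rw [hchar m, if_pos ⟨0, hRpos, by simp⟩]; omega
    refine ⟨⟨hPL, ?_, ?_, ?_⟩, hkeep, hm0⟩
    · intro j hj
      rw [hchar j]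
      by_cases hg : ∃ k < R, j = f^[k] m
      · rw [if_pos hg]; right; rfl
      · rw [if_neg hg]; exact hC1 j hj
    · intro j hj hne
      rw [hchar j] at hne
      rw [hchar (f j)]
      by_cases hg : ∃ k < R, j = f^[k] m
      · rcases hg with ⟨k, hk, hje⟩
        rcases Nat.lt_or_ge (k + 1) R with hk1 | hk1
        · rw [if_pos ⟨k + 1, hk1, by rw [hje, ← Function.iterate_succ_apply' f k m]⟩]; omega
        · have hfj : f j = f^[R] m := by
            rw [hje, ← Function.iterate_succ_apply' f k m]
            congr 1; omega
          by_cases hgR : ∃ k' < R, f j = f^[k'] m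
          · rw [if_pos hgR]; omega
          · rw [if_neg hgR, hfj]
            -- f^[R] m is not a walked node, so d was already set there
            rcases pvRex_spec f n hfn d m hm with hr | hr
            · exfalso
              rw [pvRep_iff] at hr
              rcases hr with ⟨k', hk', hkE⟩
              exact hgR ⟨k', hk', by rw [hfj, hkE]⟩
            · exact hr
      · rw [if_neg hg] at hne
        have := hC2 j hj hne
        by_cases hgf : ∃ k < R, f j = f^[k] m
        · rw [if_pos hgf]; omega
        · rw [if_neg hgf]; exact this
    · intro j hj hne
      rw [hchar j] at hne
      by_cases hg : ∃ k < R, j = f^[k] m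
      · rcases hg with ⟨k, hk, hje⟩
        have hTle : pvT f n j ≤ pvT f n m := by
          rw [hje]; exact pvT_iterate_le f n hfn m hm k
        have : ((pvT f n j : Nat) : Int) ≤ ((pvT f n m : Nat) : Int) := by exact_mod_cast hTle
        exact le_trans this (le_max_right _ _)
      · rw [if_neg hg] at hne
        exact le_trans (hC3 j hj hne) (le_max_left _ _)
  by_cases hcyc : pvDv d (f^[R] m) = -1
  · -- the walk closed a new cycle
    have hrepR : pvRep f m R := by
      rcases pvRex_spec f n hfn d m hm with hr | hr
      · exact hr
      · exact absurd hcyc hr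
    have hReq : R = pvT f n m := le_antisymm hRT (pvT_le_of_rep f n m R hrepR)
    obtain ⟨s, hs, hsE⟩ := (pvRep_iff f m R).mp hrepR
    have hxn : f^[s] m < n := pv_orbit f n hfn m hm s
    have hppos : 0 < R - s := by omega
    have hxpt : Function.IsPeriodicPt f (R - s) (f^[s] m) := by
      show f^[R - s] (f^[s] m) = f^[s] m
      rw [← Function.iterate_add_apply]
      have he : R - s + s = R := by omega
      rw [he]; exact hsE
    have hxper : f^[s] m ∈ Function.periodicPts f := ⟨R - s, hppos, hxpt⟩
    have hmp : Function.minimalPeriod f (f^[s] m) = R - s := by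
      have hle := Function.IsPeriodicPt.minimalPeriod_le hppos hxpt
      have hqpos := Function.minimalPeriod_pos_of_mem_periodicPts hxper
      rcases eq_or_lt_of_le hle with he | hlt
      · exact he
      · exfalso
        have hq : f^[s + Function.minimalPeriod f (f^[s] m)] m = f^[s] m := by
          rw [Nat.add_comm, Function.iterate_add_apply]
          exact Function.isPeriodicPt_minimalPeriod f (f^[s] m)
        exact pvT_inj f n m s (s + Function.minimalPeriod f (f^[s] m))
          (by omega) (by omega) hq.symm
    -- run the cycle-length loop
    have hb1 : PySem.List.pyGetD L1 ((f^[s] m : Nat) : Int) 0 = ((f (f^[s] m) : Nat) : Int) :=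
      hb _ hxn
    have hcyclen : pvACycLen L1 ((f^[s] m : Nat) : Int) (d.length + 1) 1
        ((f^[1] (f^[s] m) : Nat) : Int)
        = (((R - s : Nat) : Int), ((f^[s] m : Nat) : Int)) := by
      have hr := pvCycLen_run L1 f n hfn hb (f^[s] m) hxn hxper (d.length + 1) 1
        le_rfl (by rw [hmp]; omega) (by rw [hmp]; omega)
      rw [hmp] at hr
      simpa using hr
    -- run the cycle-setting loop on depth after depth[start] = length
    have hd1len : (pvSetAt d ((f^[s] m : Nat) : Int) ((R - s : Nat) : Int)).length = n := by
      rw [pvSetAt_length]; exact hlen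
    obtain ⟨hCL, hCC⟩ := pvSetCyc_run L1 f n hfn hb (f^[s] m) hxn hxper ((R - s : Nat) : Int)
      (d.length + 1) 1 (pvSetAt d ((f^[s] m : Nat) : Int) ((R - s : Nat) : Int)) hd1len
      le_rfl (by rw [hmp]; omega) (by rw [hmp]; omega)
    set dC := pvASetCyc L1 ((f^[s] m : Nat) : Int) ((R - s : Nat) : Int) (d.length + 1)
      (pvSetAt d ((f^[s] m : Nat) : Int) ((R - s : Nat) : Int))
      ((f^[1] (f^[s] m) : Nat) : Int) with hdC
    -- merged characterisation of dC against d
    simp only [hmp] at hCC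
    have hdchar : ∀ jj, pvDv dC jj
        = if ∃ w < R - s, jj = f^[w] (f^[s] m) then ((R - s : Nat) : Int) else pvDv d jj := by
      intro jj
      rw [hdC, hCC jj, pvDv_setAt d (f^[s] m) (by rw [hlen]; exact hxn)]
      by_cases hA : ∃ w < R - s, 1 ≤ w ∧ jj = f^[w] (f^[s] m)
      · rw [if_pos hA, if_pos ⟨hA.choose, hA.choose_spec.1, hA.choose_spec.2.2⟩]
      · rw [if_neg hA]
        by_cases hB : jj = f^[s] m
        · rw [if_pos hB, if_pos ⟨0, by omega, by simpa using hB⟩]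
        · rw [if_neg hB, if_neg]
          rintro ⟨w, hw, hje⟩
          match w, hw, hje with
          | 0, hw, hje => exact hB (by simpa using hje)
          | w + 1, hw, hje => exact hA ⟨w + 1, hw, by omega, hje⟩
    have hcycnode : ∀ w, w < R - s → f^[w] (f^[s] m) = f^[s + w] m := by
      intro w _
      rw [← Function.iterate_add_apply]
      congr 1; omega
    have hH1 : ∀ j < n, pvDv dC j = -1 ∨ pvDv dC j = (pvT f n j : Int) := by
      intro j hj
      rw [hdchar j]
      by_cases hg : ∃ w < R - s, j = f^[w] (f^[s] m)
      · rcases hg with ⟨w, hw, hje⟩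
        rw [if_pos ⟨w, hw, hje⟩]
        right
        have hper := pv_per_iterate f (f^[s] m) hxper w
        have hTj : pvT f n j = R - s := by
          rw [hje, pvT_eq_minimalPeriod f n hfn _ (pv_orbit f n hfn _ hxn w) hper.1,
            hper.2, hmp]
        rw [hTj]
      · rw [if_neg hg]
        exact hC1 j hj
    have hH2 : pvDv dC (f^[R] m) ≠ -1 := by
      rw [hsE, hdchar, if_pos ⟨0, hppos, by simp⟩]
      omega
    have hH3 : ∀ k < R, pvDv dC (f^[k] m) = -1 → f^[k] m ∉ Function.periodicPts f := by
      intro k hk hdk hper'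
      by_cases hks : s ≤ k
      · rw [hdchar] at hdk
        rw [if_pos ⟨k - s, by omega, by rw [hcycnode (k - s) (by omega)]; congr 1; omega⟩] at hdk
        omega
      · push Not at hks
        have hqpos := Function.minimalPeriod_pos_of_mem_periodicPts hper'
        set q := Function.minimalPeriod f (f^[k] m) with hqdef
        have hq : f^[q] (f^[k] m) = f^[k] m := Function.isPeriodicPt_minimalPeriod f (f^[k] m)
        have hrep2 : pvRep f m (k + q) := by
          rw [pvRep_iff]
          refine ⟨k, by omega, ?_⟩
          rw [Nat.add_comm, Function.iterate_add_apply]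
          exact hq
        have hTk := pvT_le_of_rep f n m (k + q) hrep2
        have ha : f^[s - k] (f^[k] m) = f^[s] m := by
          rw [← Function.iterate_add_apply]; congr 1; omega
        have hbb : f^[R - k] (f^[k] m) = f^[R] m := by
          rw [← Function.iterate_add_apply]; congr 1; omega
        have heq2 : f^[(s - k) % q] (f^[k] m) = f^[(R - k) % q] (f^[k] m) := by
          rw [Function.iterate_mod_minimalPeriod_eq, Function.iterate_mod_minimalPeriod_eq,
            ha, hbb]
          exact hsE.symm
        have hmod : (s - k) % q = (R - k) % q :=
          Function.iterate_injOn_Iio_minimalPeriod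
            (Set.mem_Iio.mpr (Nat.mod_lt _ hqpos)) (Set.mem_Iio.mpr (Nat.mod_lt _ hqpos)) heq2
        have hdvd : q ∣ (R - s) := by
          have hme : Nat.ModEq q (s - k) (R - k) := hmod
          have := (Nat.modEq_iff_dvd' (by omega)).mp hme
          have he2 : R - k - (s - k) = R - s := by omega
          rwa [he2] at this
        have hqle : q ≤ R - s := Nat.le_of_dvd hppos hdvd
        omega
    have hkeep : ∀ jj, (¬ ∃ k < R, jj = f^[k] m) → pvDv dC jj = pvDv d jj := by
      intro jj hg
      rw [hdchar jj, if_neg]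
      rintro ⟨w, hw, hje⟩
      exact hg ⟨s + w, by omega, by rw [hje, hcycnode w hw]⟩
    obtain ⟨hPL, hMC⟩ := main dC (by rw [hdC]; exact hCL) hH1 hH2 hH3 hkeep
    obtain ⟨hGood, hKeep, hNe⟩ := finish _ hPL hMC
    refine ⟨pvAPop L1 dC (pvSeen f m R).reverse, ?_, hGood, hKeep, hNe⟩
    have hdPm : PySem.List.pyGetD (pvAPop L1 dC (pvSeen f m R).reverse) ((m : Nat) : Int) (-1)
        = ((pvT f n m : Nat) : Int) := by
      rw [pvDv_pyGetD, hMC m, if_pos ⟨0, hRpos, by simp⟩]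
    have hfone : ((f (f^[s] m) : Nat) : Int) = ((f^[1] (f^[s] m) : Nat) : Int) := by simp
    unfold pvAStep
    rw [if_neg (by rw [pvDv_pyGetD]; exact not_not_intro hdm)]
    simp only [hwalk]
    rw [if_pos (by rw [pvDv_pyGetD]; exact hcyc)]
    rw [hsE, hb1, hfone]
    simp only [hcyclen]
    rw [hb1, hfone, ← hdC, hdPm]
  · -- the walk hit an already-processed node: depth1 = d
    have hH3 : ∀ k < R, pvDv d (f^[k] m) = -1 → f^[k] m ∉ Function.periodicPts f := by
      intro k hk hdk hper'
      obtain ⟨r, hr⟩ := pv_iterate_back f (f^[k] m) hper' (R - k)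
      have hz : f^[R - k] (f^[k] m) = f^[R] m := by
        rw [← Function.iterate_add_apply]; congr 1; omega
      have hset := pv_closure_iterate f n hfn d hC2 (f^[R] m) (pv_orbit f n hfn m hm R) hcyc r
      rw [← hz, hr] at hset
      exact hset hdk
    obtain ⟨hPL, hMC⟩ := main d hlen hC1 hcyc hH3 (fun jj _ => rfl)
    obtain ⟨hGood, hKeep, hNe⟩ := finish _ hPL hMC
    refine ⟨pvAPop L1 d (pvSeen f m R).reverse, ?_, hGood, hKeep, hNe⟩
    have hdPm : PySem.List.pyGetD (pvAPop L1 d (pvSeen f m R).reverse) ((m : Nat) : Int) (-1)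
        = ((pvT f n m : Nat) : Int) := by
      rw [pvDv_pyGetD, hMC m, if_pos ⟨0, hRpos, by simp⟩]
    unfold pvAStep
    rw [if_neg (by rw [pvDv_pyGetD]; exact not_not_intro hdm)]
    simp only [hwalk]
    rw [if_neg (by rw [pvDv_pyGetD]; exact hcyc)]
    rw [hdPm]

theorem pvOuter_run (L1 : List Int) (f : Nat → Nat) (n : Nat)
    (hfn : ∀ k, k < n → f k < n)
    (hb : ∀ k, k < n → PySem.List.pyGetD L1 (k : Int) 0 = ((f k : Nat) : Int)) :
    ∀ m, m ≤ n →
      ∃ d md, ((List.range m).map (fun k => ((k : Nat) : Int))).foldl (pvAStep L1)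
          (List.replicate n (-1 : Int), -1) = (d, md) ∧
        pvGood f n d md ∧ md = pvB f n m := by
  intro m
  induction m with
  | zero =>
    intro _
    refine ⟨List.replicate n (-1 : Int), -1, rfl, ⟨by simp, ?_, ?_, ?_⟩, rfl⟩
    · intro j hj; left; simp [pvDv]
    · intro j hj h; exact absurd (by simp [pvDv]) h
    · intro j hj h; exact absurd (by simp [pvDv]) h
  | succ m ih =>
    intro hm1
    have hm : m < n := by omega
    obtain ⟨d, md, heq, hGood, hmd⟩ := ih (by omega)
    have hpvB : pvB f n (m + 1) = max (pvB f n m) ((pvT f n m : Nat) : Int) := by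
      rw [pvB, pvB, List.range_succ, List.foldl_append]
      rfl
    rw [List.range_succ, List.map_append, List.foldl_append, heq]
    by_cases hdm : pvDv d m = -1
    · obtain ⟨d', heq', hGood', _, _⟩ := pvStep_run L1 f n hfn hb d md hGood m hm hdm
      refine ⟨d', max md ((pvT f n m : Nat) : Int), ?_, hGood', ?_⟩
      · simpa using heq'
      · rw [hpvB, hmd]
    · refine ⟨d, md, ?_, hGood, ?_⟩
      · show pvAStep L1 (d, md) ((m : Nat) : Int) = (d, md)
        unfold pvAStep
        rw [if_pos (by rw [pvDv_pyGetD]; exact hdm)]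
      · rw [hpvB, ← hmd]
        have hle := hGood.2.2.2 m hm hdm
        omega

-- ---- B's loop ----

theorem pvBCount_run (L : List Int) (f : Nat → Nat) (n : Nat)
    (hfn : ∀ k, k < n → f k < n)
    (hbL : ∀ k, k < n → PySem.List.pyGetD L (k : Int) 0 - 1 = ((f k : Nat) : Int))
    (i : Nat) (hi : i < n) :
    ∀ fuel t, t ≤ pvT f n i → pvT f n i - t < fuel →
      pvBCount L fuel (pvSeen f i t) ((f^[t] i : Nat) : Int) = ((pvT f n i : Nat) : Int) := by
  intro fuel
  induction fuel with
  | zero => intro t ht hf; omega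
  | succ fuel ih =>
    intro t ht hf
    rcases eq_or_lt_of_le ht with he | hlt
    · subst he
      obtain ⟨k, hk, hkE⟩ := (pvRep_iff f i _).mp (pvT_rep f n hfn i hi)
      rw [pvBCount, if_pos ((pv_contains_seen f i _ _).mpr ⟨k, hk, hkE.symm⟩)]
      simp [PySem.List.len, pvSeen_length]
    · have hnrep := pv_not_rep_lt f n i t hlt
      have hnotmem : ¬ ∃ k < t, f^[k] i = f^[t] i := by
        intro ⟨k, hk, hkE⟩
        exact hnrep ((pvRep_iff f i t).mpr ⟨k, hk, hkE.symm⟩)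
      rw [pvBCount, if_neg]
      · rw [pv_add_seen f i t hnotmem]
        have hstep : PySem.List.pyGetD L ((f^[t] i : Nat) : Int) 0 - 1 = ((f^[t+1] i : Nat) : Int) := by
          rw [hbL _ (pv_orbit f n hfn i hi t)]
          norm_cast
          rw [← Function.iterate_succ_apply' f t i]
        rw [hstep]
        exact ih (t + 1) hlt (by omega)
      · intro hcon
        exact hnotmem ((pv_contains_seen f i t _).mp hcon)

theorem pvBFold_run (L : List Int) (f : Nat → Nat) (n : Nat)
    (hfn : ∀ k, k < n → f k < n)
    (hbL : ∀ k, k < n → PySem.List.pyGetD L (k : Int) 0 - 1 = ((f k : Nat) : Int))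
    (hnL : n ≤ L.length) :
    ∀ m, m ≤ n →
      ((List.range m).map (fun k => ((k : Nat) : Int))).foldl
        (fun best i => max best (pvBCount L (L.length + 1) PySem.Set.empty i)) (-1) = pvB f n m := by
  intro m
  induction m with
  | zero => intro _; rfl
  | succ m ih =>
    intro hm1
    have hm : m < n := by omega
    rw [List.range_succ, List.map_append, List.foldl_append, ih (by omega)]
    have hcnt : pvBCount L (L.length + 1) PySem.Set.empty ((m : Nat) : Int)
        = ((pvT f n m : Nat) : Int) := by
      have h0 := pvBCount_run L f n hfn hbL m hm (L.length + 1) 0 (by omega)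
        (by have := pvT_le_n f n hfn m hm; omega)
      simpa [pvSeen] using h0
    have hpvB : pvB f n (m + 1) = max (pvB f n m) ((pvT f n m : Nat) : Int) := by
      rw [pvB, pvB, List.range_succ, List.foldl_append]
      rfl
    rw [hpvB]
    simp only [List.map_cons, List.map_nil, List.foldl_cons, List.foldl_nil, hcnt]

-- ===== VERDICT (by name: the statement is the Claim_ definition above) =====
theorem getMaxVisitableWebpages_spec : Claim_equal_getMaxVisitableWebpages := by
  intro N L _hdom hpre
  unfold Spec_getMaxVisitableWebpages
  obtain ⟨hNL, hent⟩ := hpre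
  by_cases hN : N ≤ 0
  · unfold getMaxVisitableWebpages getMaxVisitableWebpages_alt
    rw [PySem.List.pyRange_one_eq_nil hN]
    simp
  · push Not at hN
    set n := N.toNat with hn
    have hNn : N = (n : Int) := by omega
    have hnL : n ≤ L.length := by omega
    set f : Nat → Nat := fun k => (L.getD k 0 - 1).toNat with hf
    have hent' : ∀ k, k < n → 1 ≤ L.getD k 0 ∧ L.getD k 0 ≤ N := fun k hk => hent k (by omega)
    have hfn : ∀ k, k < n → f k < n := by
      intro k hk
      have := hent' k hk
      simp only [hf]
      omega
    have hcast : ∀ k, k < n → L.getD k 0 - 1 = ((f k : Nat) : Int) := by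
      intro k hk
      have := hent' k hk
      simp only [hf]
      omega
    have hb : ∀ k, k < n → PySem.List.pyGetD (L.map (fun l => l - 1)) (k : Int) 0
        = ((f k : Nat) : Int) := by
      intro k hk
      rw [PySem.List.pyGetD_natCast]
      have hkL : k < (L.map (fun l => l - 1)).length := by
        rw [List.length_map]; omega
      rw [List.getD_eq_getElem _ _ hkL, List.getElem_map, ← List.getD_eq_getElem L 0 (by omega)]
      exact hcast k hk
    have hbL : ∀ k, k < n → PySem.List.pyGetD L (k : Int) 0 - 1 = ((f k : Nat) : Int) := by
      intro k hk
      rw [PySem.List.pyGetD_natCast]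
      exact hcast k hk
    obtain ⟨d, md, heq, _hGood, hmd⟩ :=
      pvOuter_run (L.map (fun l => l - 1)) f n hfn hb n le_rfl
    unfold getMaxVisitableWebpages getMaxVisitableWebpages_alt
    rw [hNn, PySem.List.pyRange_zero_natCast]
    simp only [Int.toNat_natCast]
    rw [heq, pvBFold_run L f n hfn hbL hnL n le_rfl]
    exact hmd
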